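-- pv_equiv track=rewrite | github.com/coyo-hm/Algorithm_Study | PROGRAMMERES/2021 카카오 채용연계형 인턴십/81303_표 편집/01_220903.py | solution
-- ===== SOURCE A (Python) =====
-- def solution(n, k, cmd):
--     answer = ['O'] * n
--     del_row = []
--     table = {i: [i - 1 if i - 1 >= 0 else None, i + 1 if i + 1 < n else None] for i in range(n)}
--     for i in cmd:
--         if i == "C":
--             answer[k] = 'X'
--             [prev, next] = table[k]
--             del_row.append([prev, k, next])
--             if next == None:
--                 k = prev
--                 table[k][1] = None
--             elif prev == None:
--                 k = next
--                 table[k][0] = None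
--             else:
--                 k = next
--                 table[prev][1] = next
--                 table[next][0] = prev
--
--         elif i == "Z":
--             [prev, cur, next] = del_row.pop()
--             answer[cur] = 'O'
--             if prev == None:
--                 table[next][0] = cur
--             elif next == None:
--                 table[prev][1] = cur
--             else:
--                 table[next][0] = cur
--                 table[prev][1] = cur
--         else:
--             [d, m] = i.split(" ")
--             m = int(m)
--             for i in range(m):
--                 if d == 'D':
--                     k = table[k][1]
--                 else:
--                     k = table[k][0]
--
--     return "".join(answer)
-- ===== SOURCE B (Python) =====
-- def solution(n, k, cmd):
--     # B: keep the surviving row numbers in a sorted list `rows` with a cursor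
--     # position `pos`; moves become O(1) index arithmetic, deletes/undos edit the
--     # list, and the answer string is produced once at the end from the stack.
--     rows = list(range(n))
--     pos = k
--     stack = []
--     for c in cmd:
--         if c == "C":
--             stack.append(rows.pop(pos))
--             if pos == len(rows):
--                 pos -= 1
--         elif c == "Z":
--             r = stack.pop()
--             j = 0
--             while j < len(rows) and rows[j] < r:
--                 j += 1
--             rows.insert(j, r)
--             if j <= pos:
--                 pos += 1
--         else:
--             d, m = c.split(" ")
--             if d == 'D':
--                 pos += int(m)
--             else:
--                 pos -= int(m)
--     ans = ['O'] * n
--     for r in stack: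
--         ans[r] = 'X'
--     return "".join(ans)
-- ===== Notes on version B (the rewrite author's own statement) =====
-- stated objective: alternative
-- what changed: Replaces A's doubly-linked-list table with online answer updates by a sorted list of surviving row numbers plus a cursor position: moves become O(1) index arithmetic instead of an m-step pointer walk, and the answer string is built once at the end from the stack of deleted rows.
-- outside the precondition, e.g. on solution(2, 0, ['D -1']): A returns 'OO', B returns 'OO'; on solution(2, 0, ['D 2']): A returns 'OO', B returns 'OO'; on solution(3, 5, ['C']): A raises IndexError, B raises IndexError
import Mathlib
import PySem

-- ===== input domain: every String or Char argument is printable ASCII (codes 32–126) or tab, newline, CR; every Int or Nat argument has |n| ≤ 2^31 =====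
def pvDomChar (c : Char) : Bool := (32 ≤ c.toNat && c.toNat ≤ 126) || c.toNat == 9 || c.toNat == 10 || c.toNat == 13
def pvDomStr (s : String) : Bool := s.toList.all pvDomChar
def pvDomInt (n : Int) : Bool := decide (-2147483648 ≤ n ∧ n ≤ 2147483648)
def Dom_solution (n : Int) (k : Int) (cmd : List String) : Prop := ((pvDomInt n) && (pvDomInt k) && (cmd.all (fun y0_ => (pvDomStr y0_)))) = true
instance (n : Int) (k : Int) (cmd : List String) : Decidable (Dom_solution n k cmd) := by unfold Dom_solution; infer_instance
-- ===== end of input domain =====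

-- B replaces A's doubly-linked-list table by a sorted list of surviving rows plus a
-- cursor position, so a move command is O(1) index arithmetic instead of A's m-step
-- pointer walk, and the answer string is produced once at the end from the delete stack.

-- ===== PORT A =====

/-- A's mutable state: the answer list, the undo stack `del_row` (entries `[prev, k, next]`),
the doubly-linked `table`, and the cursor `k` (Python's `k` can hold `None`). -/
structure AState where
  answer : List Char
  delRow : List (Option Int × Option Int × Option Int)
  table  : PySem.Dict Int (Option Int × Option Int)
  k      : Option Int
deriving Repr, DecidableEq

/-- `{i: [i-1 if i-1>=0 else None, i+1 if i+1<n else None] for i in range(n)}` -/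
def initTableA (n : Int) : PySem.Dict Int (Option Int × Option Int) :=
  (PySem.List.pyRange 0 n 1).foldl
    (fun d i => d.insert i (if i - 1 ≥ 0 then some (i - 1) else none,
                            if i + 1 < n then some (i + 1) else none))
    PySem.Dict.empty

/-- One iteration of A's `for i in cmd` loop; `none` = the Python raises there. -/
def stepA (st : AState) (c : String) : Option AState :=
  if c = "C" then
    match st.k with
    | none => none                                   -- answer[None]: TypeError
    | some kv =>
      match PySem.List.pySet? st.answer kv 'X' with
      | none => none                                 -- IndexError
      | some ans =>
        match st.table.get? kv with
        | none => none                               -- KeyError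
        | some (prev, next) =>
          let dr := st.delRow ++ [(prev, some kv, next)]
          match next, prev with
          | none, none => none                       -- k = None; table[None]: KeyError
          | none, some pv =>                         -- if next == None
            match st.table.get? pv with
            | none => none
            | some e => some ⟨ans, dr, st.table.insert pv (e.1, none), some pv⟩
          | some nx, none =>                         -- elif prev == None
            match st.table.get? nx with
            | none => none
            | some e => some ⟨ans, dr, st.table.insert nx (none, e.2), some nx⟩
          | some nx, some pv =>                      -- else
            match st.table.get? pv with
            | none => none
            | some ep =>
              let t1 := st.table.insert pv (ep.1, some nx)
              match t1.get? nx with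
              | none => none
              | some en => some ⟨ans, dr, t1.insert nx (some pv, en.2), some nx⟩
  else if c = "Z" then
    match st.delRow.getLast? with
    | none => none                                   -- del_row.pop(): IndexError
    | some (prev, cur, next) =>
      let dr := st.delRow.dropLast
      match cur with
      | none => none                                 -- answer[None]: TypeError
      | some cv =>
        match PySem.List.pySet? st.answer cv 'O' with
        | none => none
        | some ans =>
          match prev, next with
          | none, none => none                       -- table[None]: KeyError
          | none, some nx =>                         -- if prev == None
            match st.table.get? nx with
            | none => none
            | some e => some ⟨ans, dr, st.table.insert nx (some cv, e.2), st.k⟩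
          | some pv, none =>                         -- elif next == None
            match st.table.get? pv with
            | none => none
            | some e => some ⟨ans, dr, st.table.insert pv (e.1, some cv), st.k⟩
          | some pv, some nx =>                      -- else
            match st.table.get? nx with
            | none => none
            | some en =>
              let t1 := st.table.insert nx (some cv, en.2)
              match t1.get? pv with
              | none => none
              | some ep => some ⟨ans, dr, t1.insert pv (ep.1, some cv), st.k⟩
  else
    match PySem.Str.split? c " " with
    | some [d, ms] =>
      match PySem.Int.ofStr? ms with
      | none => none                                 -- int(m): ValueError
      | some m =>
        -- `for i in range(m): k = table[k][1] (resp. [0])`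
        match (List.range m.toNat).foldl
            (fun (acc : Option (Option Int)) _ =>
              match acc with
              | none => none
              | some none => none                    -- table[None]: KeyError
              | some (some kv) =>
                match st.table.get? kv with
                | none => none                       -- KeyError
                | some e => some (if d = "D" then e.2 else e.1)) (some st.k) with
        | none => none
        | some k' => some ⟨st.answer, st.delRow, st.table, k'⟩
    | _ => none                                      -- unpacking [d, m]: ValueError

def runA (n : Int) (k : Int) (cmd : List String) : Option AState :=
  cmd.foldl (fun acc c => acc.bind (fun st => stepA st c))
    (some ⟨List.replicate n.toNat 'O', [], initTableA n, some k⟩)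

def solution (n : Int) (k : Int) (cmd : List String) : String :=
  match runA n k cmd with
  | some st => String.ofList st.answer                  -- "".join(answer)
  | none => ""                                      -- unreachable under Pre_ (Python raises)

-- ===== PORT B =====

/-- B's state: the sorted list of surviving row numbers, the cursor position in it,
and the stack of deleted row numbers. -/
structure BState where
  rows  : List Int
  pos   : Int
  stack : List Int
deriving Repr, DecidableEq

/-- B's `while j < len(rows) and rows[j] < r: j += 1` scan. -/
def insPosB : List Int → Int → Nat
  | [], _ => 0
  | x :: t, r => if x < r then insPosB t r + 1 else 0

/-- One iteration of B's `for c in cmd` loop; `none` = the Python raises there. -/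
def stepB (st : BState) (c : String) : Option BState :=
  if c = "C" then
    match PySem.List.pop? st.rows st.pos with
    | none => none                                   -- rows.pop(pos): IndexError
    | some (r, rows') =>
      some ⟨rows', if st.pos = (rows'.length : Int) then st.pos - 1 else st.pos,
            st.stack ++ [r]⟩
  else if c = "Z" then
    match st.stack.getLast? with
    | none => none                                   -- stack.pop(): IndexError
    | some r =>
      let j := insPosB st.rows r
      some ⟨PySem.List.insert st.rows (j : Int) r,
            if (j : Int) ≤ st.pos then st.pos + 1 else st.pos,
            st.stack.dropLast⟩
  else
    match PySem.Str.split? c " " with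
    | some [d, ms] =>
      match PySem.Int.ofStr? ms with
      | none => none                                 -- int(m): ValueError
      | some m => some ⟨st.rows, if d = "D" then st.pos + m else st.pos - m, st.stack⟩
    | _ => none                                      -- unpacking d, m: ValueError

def runB (n : Int) (k : Int) (cmd : List String) : Option BState :=
  cmd.foldl (fun acc c => acc.bind (fun st => stepB st c))
    (some ⟨PySem.List.pyRange 0 n 1, k, []⟩)

def solution_alt (n : Int) (k : Int) (cmd : List String) : String :=
  match runB n k cmd with
  | none => ""                                      -- unreachable under Pre_ (Python raises)
  | some st =>
    -- ans = ['O'] * n; for r in stack: ans[r] = 'X'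
    match st.stack.foldl
        (fun (acc : Option (List Char)) r => acc.bind (fun l => PySem.List.pySet? l r 'X'))
        (some (List.replicate n.toNat 'O')) with
    | some l => String.ofList l
    | none => ""                                    -- unreachable (stack rows are in range)

-- ===== PRECONDITION & SPEC =====

-- Spec-level helpers for Pre_: the rows still present, and the nearest surviving
-- neighbours of a row (these mirror the PROBLEM's notion of a valid scenario, not
-- either port's data structure).
def aliveRows (n : Int) (dead : List Int) : List Int :=
  (PySem.List.pyRange 0 n 1).filter (fun i => !dead.contains i)

def nextIn (n : Int) (dead : List Int) (c : Int) : Option Int :=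
  (aliveRows n dead).find? (fun j => decide (c < j))

def prevIn (n : Int) (dead : List Int) (c : Int) : Option Int :=
  ((aliveRows n dead).filter (fun j => decide (j < c))).getLast?

def aliveOk (n : Int) (dead : List Int) (c : Int) : Bool :=
  decide (0 ≤ c) && decide (c < n) && !dead.contains c

def stepMove (n : Int) (dead : List Int) (dir : Bool) (c : Int) : Option Int :=
  if aliveOk n dead c then (if dir then nextIn n dead c else prevIn n dead c) else none

def iterMove (n : Int) (dead : List Int) (dir : Bool) : Nat → Int → Option Int
  | 0, c => some c
  | m + 1, c =>
    match stepMove n dead dir c with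
    | none => none
    | some c' => iterMove n dead dir m c'

/-- A command list is a valid editing scenario in the sense of the original problem:
the cursor is only ever moved across existing rows (never past either end), `C` is only
issued on an existing row that has a surviving neighbour, `Z` only with a non-empty
history, every move command is well-formed with a non-negative count. -/
def validSim (n : Int) : List String → List Int → Int → Bool
  | [], _, _ => true
  | c :: rest, dead, cur =>
    if c = "C" then
      if aliveOk n dead cur then
        match nextIn n dead cur with
        | some nx => validSim n rest (dead ++ [cur]) nx
        | none =>
          match prevIn n dead cur with
          | some pv => validSim n rest (dead ++ [cur]) pv
          | none => false
      else false
    else if c = "Z" then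
      match dead.getLast? with
      | some _ => validSim n rest dead.dropLast cur
      | none => false
    else
      match PySem.Str.split? c " " with
      | some [d, ms] =>
        match PySem.Int.ofStr? ms with
        | some m =>
          if 0 ≤ m then
            match iterMove n dead (d = "D") m.toNat cur with
            | some cur' => validSim n rest dead cur'
            | none => false
          else false
        | none => false
      | _ => false

-- Pre_ excludes the inputs on which A raises (invalid scenarios), and also the
-- scenarios outside the problem's natural domain on which A happens to return: a
-- negative move count (A silently ignores it) and a move that walks the cursor off
-- the end of the table without ever using it again (A leaves the cursor as None).
def Pre_solution (n : Int) (k : Int) (cmd : List String) : Prop :=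
  validSim n cmd [] k = true

instance (n : Int) (k : Int) (cmd : List String) : Decidable (Pre_solution n k cmd) := by
  unfold Pre_solution; infer_instance

def pvWitness_solution : Int × Int × List String := (4, 1, ["D 2", "C", "U 2", "Z"])

def Spec_solution (n : Int) (k : Int) (cmd : List String) (out : String) : Prop :=
  out = solution_alt n k cmd
instance (n : Int) (k : Int) (cmd : List String) (out : String) : Decidable (Spec_solution n k cmd out) := by
  unfold Spec_solution; infer_instance

-- ===== CLAIM (what is proved, stated in full; the proofs are below) =====
def Claim_equal_solution : Prop := ∀ (n : Int) (k : Int) (cmd : List String), Dom_solution n k cmd → Pre_solution n k cmd → Spec_solution n k cmd (solution n k cmd)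

-- ===== LEMMAS AND PROOFS =====

-- ---- generic list facts specific to this development ----

lemma insertIdx_eq_take_cons_drop {α : Type} (l : List α) (j : Nat) (c : α) (h : j ≤ l.length) :
    l.insertIdx j c = l.take j ++ c :: l.drop j := by
  induction l generalizing j with
  | nil => simp at h; subst h; simp
  | cons x t ih =>
    cases j with
    | zero => simp
    | succ j => simp at h ⊢; exact ih j h

lemma pairwise_getElem?_lt {l : List Int} (hs : l.Pairwise (· < ·)) {q q' : Nat} {x y : Int}
    (hx : l[q]? = some x) (hy : l[q']? = some y) (h : q < q') : x < y := by
  rw [List.getElem?_eq_some_iff] at hx hy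
  obtain ⟨hq, rfl⟩ := hx
  obtain ⟨hq', rfl⟩ := hy
  exact List.pairwise_iff_getElem.mp hs q q' hq hq' h

/-- In a `<`-sorted list, the first element greater than `l[p]` is `l[p+1]`. -/
lemma find_gt_sorted {l : List Int} (hs : l.Pairwise (· < ·)) {p : Nat} {c : Int}
    (hp : l[p]? = some c) : l.find? (fun j => decide (c < j)) = l[p+1]? := by
  induction l generalizing p with
  | nil => simp at hp
  | cons x t ih =>
    rcases List.pairwise_cons.mp hs with ⟨hx, ht⟩
    cases p with
    | zero =>
      simp at hp; subst hp
      rw [List.find?_cons_of_neg (by simp)]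
      cases t with
      | nil => simp
      | cons y u => rw [List.find?_cons_of_pos (by simp [hx y (by simp)])]; simp
    | succ p =>
      simp only [List.getElem?_cons_succ] at hp
      have hcx : x < c :=
        pairwise_getElem?_lt (x := x) (y := c) hs (q := 0) (q' := p + 1) (by simp)
          (by simpa using hp) (by omega)
      rw [List.find?_cons_of_neg (by simp; omega), ih ht hp]
      simp

/-- In a `<`-sorted list, the elements smaller than `l[p]` are exactly the first `p`. -/
lemma filter_lt_sorted {l : List Int} (hs : l.Pairwise (· < ·)) {p : Nat} {c : Int}
    (hp : l[p]? = some c) : l.filter (fun j => decide (j < c)) = l.take p := by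
  induction l generalizing p with
  | nil => simp
  | cons x t ih =>
    rcases List.pairwise_cons.mp hs with ⟨hx, ht⟩
    cases p with
    | zero =>
      simp at hp; subst hp
      rw [List.filter_cons_of_neg (by simp)]
      rw [List.filter_eq_nil_iff.mpr ?_]
      · simp
      · intro a ha; simp; have := hx a ha; omega
    | succ p =>
      simp only [List.getElem?_cons_succ] at hp
      have hcx : x < c :=
        pairwise_getElem?_lt (x := x) (y := c) hs (q := 0) (q' := p + 1) (by simp)
          (by simpa using hp) (by omega)
      rw [List.filter_cons_of_pos (by simpa using hcx), ih ht hp]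
      simp

lemma getLast?_take_eq {l : List Int} {p : Nat} (hp : p ≤ l.length) :
    (l.take p).getLast? = if p = 0 then none else l[p-1]? := by
  rw [List.getLast?_eq_getElem?]
  cases p with
  | zero => simp
  | succ p =>
    simp only [List.length_take, Nat.succ_sub_one, if_neg (Nat.succ_ne_zero p)]
    rw [min_eq_left hp]
    rw [List.getElem?_take]
    simp

lemma filter_ne_eraseIdx {l : List Int} (hnd : l.Nodup) {p : Nat} {c : Int}
    (hp : l[p]? = some c) : l.filter (fun j => !(j == c)) = l.eraseIdx p := by
  induction l generalizing p with
  | nil => simp at hp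
  | cons x t ih =>
    rcases List.nodup_cons.mp hnd with ⟨hx, ht⟩
    cases p with
    | zero =>
      simp at hp; subst hp
      rw [List.eraseIdx_cons_zero, List.filter_cons_of_neg (by simp)]
      exact List.filter_eq_self.mpr (fun a ha => by simp; intro h; exact hx (h ▸ ha))
    | succ p =>
      simp only [List.getElem?_cons_succ] at hp
      have hxc : x ≠ c := by
        intro h; subst h; exact hx (List.mem_iff_getElem?.mpr ⟨p, hp⟩)
      rw [List.eraseIdx_cons_succ, List.filter_cons_of_pos (by simpa using hxc), ih ht hp]

lemma insPosB_le (l : List Int) (c : Int) : insPosB l c ≤ l.length := by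
  induction l with
  | nil => simp [insPosB]
  | cons x t ih => simp [insPosB]; split <;> simp <;> omega

/-- Re-inserting a removed element of a sorted list at B's scan position restores the list. -/
lemma insert_filter_ne {l : List Int} (hs : l.Pairwise (· < ·)) {c : Int} (hc : c ∈ l) :
    ((l.filter (fun j => !(j == c))).insertIdx
      (insPosB (l.filter (fun j => !(j == c))) c) c) = l := by
  induction l with
  | nil => simp at hc
  | cons x t ih =>
    rcases List.pairwise_cons.mp hs with ⟨hx, ht⟩
    by_cases hxc : x = c
    · subst hxc
      have : t.filter (fun j => !(j == x)) = t :=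
        List.filter_eq_self.mpr (fun a ha => by simp; intro h; subst h; exact absurd (hx a ha) (lt_irrefl a))
      rw [List.filter_cons_of_neg (by simp), this]
      cases t with
      | nil => simp [insPosB]
      | cons y u =>
        have hxy : x < y := hx y (by simp)
        simp [insPosB, if_neg (by omega : ¬ y < x)]
    · have hct : c ∈ t := by rcases List.mem_cons.mp hc with h | h; exact absurd h.symm hxc; exact h
      have hxc' : x < c := hx c hct
      rw [List.filter_cons_of_pos (by simpa using hxc)]
      simp only [insPosB, if_pos hxc']
      rw [List.insertIdx_succ_cons, ih ht hct]

-- ---- aliveRows facts ----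

lemma mem_aliveRows {n : Int} {dead : List Int} {m : Int} :
    m ∈ aliveRows n dead ↔ 0 ≤ m ∧ m < n ∧ m ∉ dead := by
  simp [aliveRows, List.mem_filter, PySem.List.mem_pyRange_one]
  tauto

lemma sorted_aliveRows (n : Int) (dead : List Int) : (aliveRows n dead).Pairwise (· < ·) :=
  List.Pairwise.filter _ (PySem.List.pairwise_lt_pyRange_one 0 n)

lemma nodup_aliveRows (n : Int) (dead : List Int) : (aliveRows n dead).Nodup :=
  List.Pairwise.imp (fun h => ne_of_lt h) (sorted_aliveRows n dead)

lemma aliveRows_append (n : Int) (dead : List Int) (c : Int) :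
    aliveRows n (dead ++ [c]) = (aliveRows n dead).filter (fun j => !(j == c)) := by
  simp only [aliveRows, List.filter_filter]
  apply List.filter_congr
  intro a _
  by_cases h1 : a ∈ dead <;> by_cases h2 : a = c <;> simp [h1, h2]

lemma aliveOk_iff {n : Int} {dead : List Int} {c : Int} :
    aliveOk n dead c = true ↔ c ∈ aliveRows n dead := by
  simp [aliveOk, mem_aliveRows]
  tauto

lemma nextIn_eq {n : Int} {dead : List Int} {p : Nat} {c : Int}
    (hp : (aliveRows n dead)[p]? = some c) : nextIn n dead c = (aliveRows n dead)[p+1]? :=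
  find_gt_sorted (sorted_aliveRows n dead) hp

lemma prevIn_eq {n : Int} {dead : List Int} {p : Nat} {c : Int}
    (hp : (aliveRows n dead)[p]? = some c) :
    prevIn n dead c = if p = 0 then none else (aliveRows n dead)[p-1]? := by
  have hlen : p < (aliveRows n dead).length := (List.getElem?_eq_some_iff.mp hp).1
  rw [prevIn, filter_lt_sorted (sorted_aliveRows n dead) hp, getLast?_take_eq (le_of_lt hlen)]

-- ---- dspec facts ----

/-- The `[prev, k, next]` triple A records when deleting row `j` while the rows in `pre`
are already deleted. -/
def tripleAt (n : Int) (pre : List Int) (j : Int) : Option Int × Option Int × Option Int :=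
  (prevIn n pre j, some j, nextIn n pre j)

/-- The contents of A's `del_row` stack determined by the deletion history. -/
def dspec (n : Int) : List Int → List Int → List (Option Int × Option Int × Option Int)
  | _, [] => []
  | pre, j :: rest => tripleAt n pre j :: dspec n (pre ++ [j]) rest

lemma dspec_append (n : Int) (xs : List Int) : ∀ (pre : List Int) (j : Int),
    dspec n pre (xs ++ [j]) = dspec n pre xs ++ [tripleAt n (pre ++ xs) j] := by
  induction xs with
  | nil => intro pre j; simp [dspec]
  | cons x t ih =>
    intro pre j
    simp only [List.cons_append, dspec, ih (pre ++ [x]) j, List.append_assoc, List.cons_append,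
      List.nil_append]

-- ---- initial table ----

lemma get?_foldl_insert_const {v : Int → Option Int × Option Int} (l : List Int) :
    ∀ (d : PySem.Dict Int (Option Int × Option Int)) (m : Int),
    (l.foldl (fun d i => d.insert i (v i)) d).get? m = if m ∈ l then some (v m) else d.get? m := by
  induction l with
  | nil => intro d m; simp
  | cons x t ih =>
    intro d m
    simp only [List.foldl_cons, ih]
    by_cases hm : m ∈ t
    · simp [hm, List.mem_cons]
    · rw [if_neg hm, PySem.Dict.get?_insert]
      by_cases hmx : m = x <;> simp [hmx, hm]

lemma initTableA_get? (n : Int) (m : Int) :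
    (initTableA n).get? m = if 0 ≤ m ∧ m < n then
      some (if m - 1 ≥ 0 then some (m - 1) else none, if m + 1 < n then some (m + 1) else none)
      else none := by
  rw [initTableA, get?_foldl_insert_const]
  simp [PySem.List.mem_pyRange_one]

-- ---- the simulation invariant ----

/-- The simulation invariant relating the abstract scenario state (`dead`, `cur`) to the
states of the two ports.  When the initial cursor is out of range (and hence no command may
ever use it), the cursor-position component is vacuous and the history is empty. -/
structure SimInv (n : Int) (dead : List Int) (cur : Int) (a : AState) (b : BState) : Prop where
  rows_eq : b.rows = aliveRows n dead
  stack_eq : b.stack = dead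
  dead_mem : ∀ j ∈ dead, 0 ≤ j ∧ j < n
  nodup : dead.Nodup
  k_eq : a.k = some cur
  ans_len : a.answer.length = n.toNat
  ans_at : ∀ i : Nat, i < n.toNat → a.answer[i]? = some (if (i : Int) ∈ dead then 'X' else 'O')
  del_eq : a.delRow = dspec n [] dead
  tbl_alive : ∀ (q : Nat) (m : Int), (aliveRows n dead)[q]? = some m →
      a.table.get? m = some (if q = 0 then none else (aliveRows n dead)[q-1]?, (aliveRows n dead)[q+1]?)
  tbl_dead : ∀ (i : Nat) (j : Int), dead[i]? = some j →
      a.table.get? j = some (prevIn n (dead.take i) j, nextIn n (dead.take i) j)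
  pos_inv : (∃ p : Nat, b.pos = (p : Int) ∧ (aliveRows n dead)[p]? = some cur) ∨
      (¬ (0 ≤ cur ∧ cur < n) ∧ dead = [])

lemma aliveRows_nil (n : Int) : aliveRows n [] = PySem.List.pyRange 0 n 1 := by
  simp [aliveRows]

lemma SimInv.init (n : Int) (k : Int) :
    SimInv n [] k ⟨List.replicate n.toNat 'O', [], initTableA n, some k⟩
      ⟨PySem.List.pyRange 0 n 1, k, []⟩ := by
  have hrange : ∀ q : Nat, (aliveRows n [])[q]? =
      if q < n.toNat then some ((q : Int)) else none := by
    intro q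
    rw [aliveRows_nil]
    rw [PySem.List.getElem?_pyRange_one]
    simp
  refine ⟨by simp [aliveRows_nil], rfl, by simp, by simp, rfl, by simp, ?_, rfl, ?_, by simp, ?_⟩
  · intro i hi; simp [hi]
  · intro q m hq
    rw [hrange q] at hq
    by_cases hqn : q < n.toNat
    · rw [if_pos hqn] at hq
      have hm : m = (q : Int) := by injection hq; omega
      subst hm
      rw [initTableA_get?]
      rw [if_pos (by constructor <;> omega)]
      have e1 : (if (q:Int) - 1 ≥ 0 then some ((q:Int) - 1) else none)
          = (if q = 0 then none else (aliveRows n [])[q-1]?) := by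
        rcases Nat.eq_zero_or_pos q with h0 | h0
        · subst h0; simp
        · rw [if_pos (by omega : (q:Int) - 1 ≥ 0), if_neg (by omega : ¬ q = 0),
            hrange (q-1), if_pos (by omega)]
          congr 1; push_cast; omega
      have e2 : (if (q:Int) + 1 < n then some ((q:Int) + 1) else none)
          = (aliveRows n [])[q+1]? := by
        rw [hrange (q+1)]
        by_cases h1 : (q:Int) + 1 < n
        · rw [if_pos h1, if_pos (by omega)]; push_cast; ring_nf
        · rw [if_neg h1, if_neg (by omega)]
      rw [e1, e2]
    · rw [if_neg hqn] at hq; simp at hq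
  · by_cases hk : 0 ≤ k ∧ k < n
    · refine Or.inl ⟨k.toNat, by simp; omega, ?_⟩
      rw [hrange k.toNat, if_pos (by omega)]
      simp; omega
    · exact Or.inr ⟨hk, rfl⟩

-- ---- step lemmas ----

lemma foldl_range_iterate {α : Type} (g : α → α) (m : Nat) (init : α) :
    (List.range m).foldl (fun acc _ => g acc) init = g^[m] init := by
  induction m with
  | zero => simp
  | succ m ih => rw [List.range_succ, List.foldl_append, ih, Function.iterate_succ_apply']; simp

lemma getElem?_ne_of_ne {l : List Int} (hs : l.Pairwise (· < ·)) {i j : Nat} {x y : Int}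
    (hx : l[i]? = some x) (hy : l[j]? = some y) (hne : i ≠ j) : x ≠ y := by
  rcases Nat.lt_or_ge i j with h | h
  · exact ne_of_lt (pairwise_getElem?_lt hs hx hy h)
  · exact (ne_of_lt (pairwise_getElem?_lt hs hy hx (by omega))).symm

lemma getElem?_inj_sorted {l : List Int} (hs : l.Pairwise (· < ·)) {i j : Nat} {x : Int}
    (hx : l[i]? = some x) (hy : l[j]? = some x) : i = j := by
  by_contra hne
  exact getElem?_ne_of_ne hs hx hy hne rfl

lemma stepC_sim {n : Int} {dead : List Int} {cur : Int} {a : AState} {b : BState}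
    (inv : SimInv n dead cur a b) (hok : aliveOk n dead cur = true) {cur' : Int}
    (hcur' : (match nextIn n dead cur with
              | some nx => some nx
              | none => prevIn n dead cur) = some cur') :
    ∃ a' b', stepA a "C" = some a' ∧ stepB b "C" = some b' ∧ SimInv n (dead ++ [cur]) cur' a' b' := by
  obtain ⟨hc0, hcn, hcd⟩ := mem_aliveRows.mp (aliveOk_iff.mp hok)
  rcases inv.pos_inv with ⟨p, hbp, hp⟩ | ⟨hcur, _⟩
  swap
  · exact absurd ⟨hc0, hcn⟩ hcur
  have hsort := sorted_aliveRows n dead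
  have hnd := nodup_aliveRows n dead
  have hplen : p < (aliveRows n dead).length := (List.getElem?_eq_some_iff.mp hp).1
  -- the new row list
  have hrows' : aliveRows n (dead ++ [cur]) = (aliveRows n dead).eraseIdx p := by
    rw [aliveRows_append, filter_ne_eraseIdx hnd hp]
  have hE : ∀ i : Nat, ((aliveRows n dead).eraseIdx p)[i]? = if i < p then (aliveRows n dead)[i]? else (aliveRows n dead)[i+1]? :=
    fun i => List.getElem?_eraseIdx
  have hlen' : ((aliveRows n dead).eraseIdx p).length = (aliveRows n dead).length - 1 := by
    simp [List.length_eraseIdx, hplen]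
  -- Python answer[k] = 'X'
  have hctoNat : cur.toNat < a.answer.length := by rw [inv.ans_len]; omega
  have hset : PySem.List.pySet? a.answer cur 'X' = some (a.answer.set cur.toNat 'X') := by
    have h1 : cur = ((cur.toNat : Nat) : Int) := by omega
    conv_lhs => rw [h1]
    rw [PySem.List.pySet?_natCast _ _ _ hctoNat]
  have htblc := inv.tbl_alive p cur hp
  have hnext := nextIn_eq hp
  have hprev := prevIn_eq hp
  have hcurp : (aliveRows n dead)[p]'(List.getElem?_eq_some_iff.mp hp).1 = cur :=
    (List.getElem?_eq_some_iff.mp hp).2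
  -- B's pop
  have hpop : PySem.List.pop? b.rows b.pos = some (cur, (aliveRows n dead).eraseIdx p) := by
    rw [inv.rows_eq, hbp, PySem.List.pop?_natCast _ p hplen]
    rw [hcurp]
  -- shared invariant fields
  have hmem' : ∀ j ∈ dead ++ [cur], 0 ≤ j ∧ j < n := by
    intro j hj
    rcases List.mem_append.mp hj with h | h
    · exact inv.dead_mem j h
    · simp at h; subst h; exact ⟨hc0, hcn⟩
  have hnodup' : (dead ++ [cur]).Nodup := by
    simp [List.nodup_append, inv.nodup]
    exact fun x hx h => hcd (h ▸ hx)
  have hanslen' : (a.answer.set cur.toNat 'X').length = n.toNat := by simp [inv.ans_len]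
  have hans' : ∀ i : Nat, i < n.toNat →
      (a.answer.set cur.toNat 'X')[i]? = some (if (i : Int) ∈ dead ++ [cur] then 'X' else 'O') := by
    intro i hi
    rw [List.getElem?_set]
    by_cases hic : cur.toNat = i
    · rw [if_pos hic, if_pos (hic ▸ hctoNat), if_pos (by simp; right; omega)]
    · rw [if_neg hic, inv.ans_at i hi]
      have : ((i : Int) ∈ dead ++ [cur]) ↔ ((i : Int) ∈ dead) := by
        simp [List.mem_append]; intro h; omega
      by_cases hm : (i : Int) ∈ dead
      · rw [if_pos hm, if_pos (this.mpr hm)]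
      · rw [if_neg hm, if_neg (fun hh => hm (this.mp hh))]
  have htake' : ∀ i : Nat, i < dead.length → (dead ++ [cur]).take i = dead.take i :=
    fun i hi => List.take_append_of_le_length (le_of_lt hi)
  have hdeadget : ∀ i : Nat, i < dead.length → (dead ++ [cur])[i]? = dead[i]? := by
    intro i hi
    rw [List.getElem?_append, if_pos hi]
  have hdeadne : ∀ {j q : Nat} {v : Int}, (aliveRows n dead)[q]? = some v → dead[j]? = some v → False := by
    intro j q v hv hdv
    have : v ∈ (aliveRows n dead) := List.mem_iff_getElem?.mpr ⟨q, hv⟩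
    have hvd : v ∈ dead := List.mem_iff_getElem?.mpr ⟨j, hdv⟩
    exact (mem_aliveRows.mp this).2.2 hvd
  -- the recorded triple
  have hdel' : ∀ (pE nE : Option Int), pE = prevIn n dead cur → nE = nextIn n dead cur →
      a.delRow ++ [(pE, some cur, nE)] = dspec n [] (dead ++ [cur]) := by
    intro pE nE hpE hnE
    rw [dspec_append, ← inv.del_eq, tripleAt, List.nil_append, hpE, hnE]
  rcases hnx : nextIn n dead cur with _ | nx
  -- ===== next is None: p is the last position =====
  · have hplast : p + 1 = (aliveRows n dead).length := by
      rw [hnext] at hnx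
      have := List.getElem?_eq_none_iff.mp hnx
      omega
    rw [hnx] at hcur'
    have hpv : prevIn n dead cur = some cur' := hcur'
    have hp0 : p ≠ 0 := by
      intro h0
      rw [h0] at hprev
      rw [hprev] at hpv
      simp at hpv
    have hpm1 : (aliveRows n dead)[p-1]? = some cur' := by
      rw [hprev, if_neg hp0] at hpv; exact hpv
    have hepv := inv.tbl_alive (p-1) cur' hpm1
    have hpvne : cur' ≠ cur := getElem?_ne_of_ne hsort hpm1 hp (by omega)
    -- A's step
    have hAeq : stepA a "C" = some ⟨a.answer.set cur.toNat 'X',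
        a.delRow ++ [(some cur', some cur, none)],
        a.table.insert cur' ((if p - 1 = 0 then none else (aliveRows n dead)[p-1-1]?), none),
        some cur'⟩ := by
      have htblc' : a.table.get? cur = some (some cur', none) := by
        rw [htblc, if_neg hp0, ← hnext, hnx, hpm1]
      have hepv' : a.table.get? cur' =
          some ((if p - 1 = 0 then none else (aliveRows n dead)[p-1-1]?), (aliveRows n dead)[p-1+1]?) := hepv
      simp only [stepA, reduceIte, inv.k_eq, hset, htblc', hepv']
    -- B's step
    have hBeq : stepB b "C" = some ⟨(aliveRows n dead).eraseIdx p, b.pos - 1, dead ++ [cur]⟩ := by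
      simp only [stepB, reduceIte, hpop]
      rw [if_pos (by rw [hbp, hlen']; congr 1; omega), inv.stack_eq]
    refine ⟨_, _, hAeq, hBeq, ?_⟩
    refine ⟨by rw [hrows'], rfl, hmem', hnodup', rfl, hanslen', hans',
      hdel' _ _ hpv.symm hnx.symm, ?_, ?_, ?_⟩
    · -- tbl_alive
      intro q' m' hq'
      rw [hrows'] at hq'
      rw [hrows', PySem.Dict.get?_insert]
      rw [hE q'] at hq'
      by_cases hq'p : q' < p
      · rw [if_pos hq'p] at hq'
        by_cases hmc : m' = cur'
        · -- q' = p - 1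
          have hq'e : q' = p - 1 := getElem?_inj_sorted hsort hq' (hmc ▸ hpm1)
          rw [if_pos hmc]
          subst hq'e
          refine congrArg some ?_
          rw [Prod.mk.injEq]
          refine ⟨?_, ?_⟩
          · by_cases h0 : p - 1 = 0
            · rw [if_pos h0, if_pos h0]
            · rw [if_neg h0, if_neg h0, hE (p-1-1), if_pos (by omega)]
          · rw [hE (p-1+1)]
            rw [if_neg (by omega)]
            have h1 : p - 1 + 1 + 1 = p + 1 := by omega
            rw [h1, List.getElem?_eq_none_iff.mpr (by omega)]
        · rw [if_neg hmc]
          have hq'ne : q' ≠ p - 1 := by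
            intro h; exact hmc (by rw [h] at hq'; injection (hq'.symm.trans hpm1))
          have hold := inv.tbl_alive q' m' hq'
          rw [hold]
          refine congrArg some ?_
          rw [Prod.mk.injEq]
          refine ⟨?_, ?_⟩
          · by_cases h0 : q' = 0
            · simp [h0]
            · rw [if_neg h0, if_neg h0, hE (q'-1), if_pos (by omega)]
          · rw [hE (q'+1), if_pos (by omega)]
      · -- q' ≥ p: but then q'+1 ≥ p+1 = length, so none
        rw [if_neg hq'p] at hq'
        rw [List.getElem?_eq_none_iff.mpr (by omega)] at hq'
        simp at hq'
    · -- tbl_dead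
      intro i j hij
      by_cases hi : i < dead.length
      · rw [hdeadget i hi] at hij
        rw [htake' i hi, PySem.Dict.get?_insert,
          if_neg (fun h => hdeadne hpm1 (h ▸ hij)), inv.tbl_dead i j hij]
      · have hieq : i = dead.length := by
          have := (List.getElem?_eq_some_iff.mp hij).1
          simp at this
          omega
        subst hieq
        have hjc : j = cur := by
          rw [List.getElem?_append_right (by omega)] at hij
          simp at hij
          exact hij.symm
        subst hjc
        rw [List.take_append_of_le_length (le_refl _), List.take_length,
          PySem.Dict.get?_insert, if_neg hpvne.symm, htblc]
        rw [hprev, hnext]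
    · -- pos_inv
      refine Or.inl ⟨p - 1, ?_, ?_⟩
      · show b.pos - 1 = ((p - 1 : Nat) : Int)
        rw [hbp]; omega
      · rw [hrows', hE (p-1), if_pos (by omega), hpm1]
  -- ===== next is some nx =====
  · rw [hnx] at hcur'
    have hnxcur : cur' = nx := by injection hcur'.symm
    subst hnxcur
    have hp1 : (aliveRows n dead)[p+1]? = some cur' := by rw [← hnext, hnx]
    have hp1len : p + 1 < (aliveRows n dead).length := (List.getElem?_eq_some_iff.mp hp1).1
    have hnxne : cur' ≠ cur := getElem?_ne_of_ne hsort hp1 hp (by omega)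
    have henx := inv.tbl_alive (p+1) cur' hp1
    -- B's step (same in both sub-branches)
    have hBeq : stepB b "C" = some ⟨(aliveRows n dead).eraseIdx p, b.pos, dead ++ [cur]⟩ := by
      simp only [stepB, reduceIte, hpop]
      rw [if_neg (by rw [hbp, hlen']; intro h; have : p = (aliveRows n dead).length - 1 := by exact_mod_cast h
                     omega), inv.stack_eq]
    have hposinv : (∃ p' : Nat, b.pos = (p' : Int) ∧ (aliveRows n (dead ++ [cur]))[p']? = some cur') ∨
        (¬ (0 ≤ cur' ∧ cur' < n) ∧ dead ++ [cur] = []) := by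
      refine Or.inl ⟨p, hbp, ?_⟩
      rw [hrows', hE p, if_neg (by omega), hp1]
    by_cases hp0 : p = 0
    -- ---- prev is None ----
    · have hprevnone : prevIn n dead cur = none := by rw [hprev, if_pos hp0]
      have hAeq : stepA a "C" = some ⟨a.answer.set cur.toNat 'X',
          a.delRow ++ [(none, some cur, some cur')],
          a.table.insert cur' (none, (aliveRows n dead)[p+1+1]?),
          some cur'⟩ := by
        have htblc' : a.table.get? cur = some (none, some cur') := by
          rw [htblc, if_pos hp0, ← hnext, hnx]
        have henx' : a.table.get? cur' =
            some ((if p + 1 = 0 then none else (aliveRows n dead)[p+1-1]?), (aliveRows n dead)[p+1+1]?) := henx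
        simp only [stepA, reduceIte, inv.k_eq, hset, htblc', henx']
      refine ⟨_, _, hAeq, hBeq, ?_⟩
      refine ⟨by rw [hrows'], rfl, hmem', hnodup', rfl, hanslen', hans',
        hdel' _ _ hprevnone.symm hnx.symm, ?_, ?_, hposinv⟩
      · -- tbl_alive
        intro q' m' hq'
        rw [hrows'] at hq'
        rw [hrows', PySem.Dict.get?_insert]
        rw [hE q', if_neg (by omega)] at hq'
        by_cases hmc : m' = cur'
        · have hq'e : q' + 1 = p + 1 := getElem?_inj_sorted hsort hq' (hmc ▸ hp1)
          have hq'0 : q' = 0 := by omega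
          rw [if_pos hmc]
          subst hq'0
          refine congrArg some ?_
          rw [Prod.mk.injEq]
          refine ⟨?_, ?_⟩
          · rw [if_pos rfl]
          · rw [hE 1, if_neg (by omega)]
            rw [hp0]
        · rw [if_neg hmc]
          have hq'ne : q' + 1 ≠ p + 1 := by
            intro h; exact hmc (by rw [h] at hq'; injection (hq'.symm.trans hp1))
          have hold := inv.tbl_alive (q'+1) m' hq'
          rw [hold]
          refine congrArg some ?_
          rw [Prod.mk.injEq]
          refine ⟨?_, ?_⟩
          · have hq'0 : q' ≠ 0 := by omega
            rw [if_neg (by omega), if_neg hq'0, hE (q'-1), if_neg (by omega)]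
            have h1 : q' - 1 + 1 = q' := by omega
            have h2 : q' + 1 - 1 = q' := by omega
            rw [h1, h2]
          · rw [hE (q'+1), if_neg (by omega)]
      · -- tbl_dead
        intro i j hij
        by_cases hi : i < dead.length
        · rw [hdeadget i hi] at hij
          rw [htake' i hi, PySem.Dict.get?_insert,
            if_neg (fun h => hdeadne hp1 (h ▸ hij)), inv.tbl_dead i j hij]
        · have hieq : i = dead.length := by
            have := (List.getElem?_eq_some_iff.mp hij).1
            simp at this
            omega
          subst hieq
          have hjc : j = cur := by
            rw [List.getElem?_append_right (by omega)] at hij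
            simp at hij
            exact hij.symm
          subst hjc
          rw [List.take_append_of_le_length (le_refl _), List.take_length,
            PySem.Dict.get?_insert, if_neg hnxne.symm, htblc]
          rw [hprev, hnext]
    -- ---- middle: both neighbours exist ----
    · obtain ⟨pv, hpm1⟩ : ∃ pv, (aliveRows n dead)[p-1]? = some pv := by
        have : p - 1 < (aliveRows n dead).length := by omega
        exact ⟨(aliveRows n dead)[p-1], List.getElem?_eq_getElem this⟩
      have hprevpv : prevIn n dead cur = some pv := by rw [hprev, if_neg hp0, hpm1]
      have hepv := inv.tbl_alive (p-1) pv hpm1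
      have hpvnx : pv ≠ cur' := getElem?_ne_of_ne hsort hpm1 hp1 (by omega)
      have hpvcur : pv ≠ cur := getElem?_ne_of_ne hsort hpm1 hp (by omega)
      have hAeq : stepA a "C" = some ⟨a.answer.set cur.toNat 'X',
          a.delRow ++ [(some pv, some cur, some cur')],
          (a.table.insert pv ((if p - 1 = 0 then none else (aliveRows n dead)[p-1-1]?), some cur')).insert cur'
            (some pv, (aliveRows n dead)[p+1+1]?),
          some cur'⟩ := by
        have htblc' : a.table.get? cur = some (some pv, some cur') := by
          rw [htblc, if_neg hp0, ← hnext, hnx, hpm1]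
        have hepv' : a.table.get? pv =
            some ((if p - 1 = 0 then none else (aliveRows n dead)[p-1-1]?), (aliveRows n dead)[p-1+1]?) := hepv
        simp only [stepA, reduceIte, inv.k_eq, hset, htblc', hepv']
        rw [PySem.Dict.get?_insert, if_neg hpvnx.symm, henx]
      refine ⟨_, _, hAeq, hBeq, ?_⟩
      refine ⟨by rw [hrows'], rfl, hmem', hnodup', rfl, hanslen', hans',
        hdel' _ _ hprevpv.symm hnx.symm, ?_, ?_, hposinv⟩
      · -- tbl_alive
        intro q' m' hq'
        rw [hrows'] at hq'
        rw [hrows', PySem.Dict.get?_insert, PySem.Dict.get?_insert]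
        rw [hE q'] at hq'
        by_cases hmc : m' = cur'
        · -- q' = p
          have hq'e : q' = p := by
            by_cases h : q' < p
            · rw [if_pos h] at hq'
              exact absurd (getElem?_inj_sorted hsort hq' (hmc ▸ hp1)) (by omega)
            · rw [if_neg h] at hq'
              have := getElem?_inj_sorted hsort hq' (hmc ▸ hp1)
              omega
          rw [if_pos hmc]
          subst hq'e
          refine congrArg some ?_
          rw [Prod.mk.injEq]
          refine ⟨?_, ?_⟩
          · rw [if_neg hp0, hE (q'-1), if_pos (by omega), hpm1]
          · rw [hE (q'+1), if_neg (by omega)]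
        · by_cases hmp : m' = pv
          · -- q' = p - 1
            have hq'lt : q' < p := by
              by_cases h : q' < p
              · exact h
              · rw [if_neg h] at hq'
                have := getElem?_inj_sorted hsort hq' (hmp ▸ hpm1)
                omega
            rw [if_pos hq'lt] at hq'
            have hq'e : q' = p - 1 := getElem?_inj_sorted hsort hq' (hmp ▸ hpm1)
            rw [if_neg hmc, if_pos hmp]
            subst hq'e
            refine congrArg some ?_
            rw [Prod.mk.injEq]
            refine ⟨?_, ?_⟩
            · by_cases h0 : p - 1 = 0
              · simp [h0]
              · rw [if_neg h0, if_neg h0, hE (p-1-1), if_pos (by omega)]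
            · rw [hE (p-1+1), if_neg (by omega)]
              have h1 : p - 1 + 1 + 1 = p + 1 := by omega
              rw [h1, hp1]
          · rw [if_neg hmc, if_neg hmp]
            by_cases hq'p : q' < p
            · rw [if_pos hq'p] at hq'
              have hq'ne : q' ≠ p - 1 := by
                intro h; exact hmp (by rw [h] at hq'; injection (hq'.symm.trans hpm1))
              have hold := inv.tbl_alive q' m' hq'
              rw [hold]
              refine congrArg some ?_
              rw [Prod.mk.injEq]
              refine ⟨?_, ?_⟩
              · by_cases h0 : q' = 0
                · simp [h0]
                · rw [if_neg h0, if_neg h0, hE (q'-1), if_pos (by omega)]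
              · rw [hE (q'+1), if_pos (by omega)]
            · rw [if_neg hq'p] at hq'
              have hq'ne : q' + 1 ≠ p + 1 := by
                intro h; exact hmc (by rw [h] at hq'; injection (hq'.symm.trans hp1))
              have hold := inv.tbl_alive (q'+1) m' hq'
              rw [hold]
              refine congrArg some ?_
              rw [Prod.mk.injEq]
              refine ⟨?_, ?_⟩
              · rw [if_neg (by omega), if_neg (by omega : ¬ q' = 0), hE (q'-1),
                  if_neg (by omega)]
                have h1 : q' - 1 + 1 = q' := by omega
                have h2 : q' + 1 - 1 = q' := by omega
                rw [h1, h2]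
              · rw [hE (q'+1), if_neg (by omega)]
      · -- tbl_dead
        intro i j hij
        by_cases hi : i < dead.length
        · rw [hdeadget i hi] at hij
          rw [htake' i hi, PySem.Dict.get?_insert, if_neg (fun h => hdeadne hp1 (h ▸ hij)),
            PySem.Dict.get?_insert, if_neg (fun h => hdeadne hpm1 (h ▸ hij)),
            inv.tbl_dead i j hij]
        · have hieq : i = dead.length := by
            have := (List.getElem?_eq_some_iff.mp hij).1
            simp at this
            omega
          subst hieq
          have hjc : j = cur := by
            rw [List.getElem?_append_right (by omega)] at hij
            simp at hij
            exact hij.symm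
          subst hjc
          rw [List.take_append_of_le_length (le_refl _), List.take_length,
            PySem.Dict.get?_insert, if_neg hnxne.symm, PySem.Dict.get?_insert,
            if_neg hpvcur.symm, htblc]
          rw [hprev, hnext]

lemma stepZ_sim {n : Int} {dead : List Int} {cur : Int} {a : AState} {b : BState}
    (inv : SimInv n dead cur a b) (hne : dead ≠ []) :
    ∃ a' b', stepA a "Z" = some a' ∧ stepB b "Z" = some b' ∧ SimInv n dead.dropLast cur a' b' := by
  obtain ⟨p, hbp, hp⟩ | ⟨_, hdnil⟩ := inv.pos_inv
  swap
  · exact absurd hdnil hne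
  set jt := dead.getLast hne with hjtdef
  have hlast : dead.getLast? = some jt := List.getLast?_eq_some_getLast hne
  have hdecomp : dead.dropLast ++ [jt] = dead := List.dropLast_append_getLast hne
  have hjmem : jt ∈ dead := List.getLast_mem hne
  obtain ⟨hj0, hjn⟩ := inv.dead_mem jt hjmem
  have hjnot : jt ∉ dead.dropLast := by
    have h := inv.nodup
    rw [← hdecomp] at h
    rcases List.nodup_append.mp h with ⟨_, _, hdisj⟩
    exact fun hmem2 => hdisj jt hmem2 jt (by simp) rfl
  have hsortF := sorted_aliveRows n dead.dropLast
  have hndF := nodup_aliveRows n dead.dropLast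
  have hjF : jt ∈ aliveRows n dead.dropLast := mem_aliveRows.mpr ⟨hj0, hjn, hjnot⟩
  have hRF : aliveRows n dead = (aliveRows n dead.dropLast).filter (fun x => !(x == jt)) := by
    conv_lhs => rw [← hdecomp]
    rw [aliveRows_append]
  have hins : (aliveRows n dead).insertIdx (insPosB (aliveRows n dead) jt) jt
      = aliveRows n dead.dropLast := by
    conv_lhs => rw [hRF]
    exact insert_filter_ne hsortF hjF
  set j := insPosB (aliveRows n dead) jt with hjdef
  have hjle : j ≤ (aliveRows n dead).length := insPosB_le _ _
  have hF : ∀ i : Nat, (aliveRows n dead.dropLast)[i]? =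
      if i < j then (aliveRows n dead)[i]? else if i = j then some jt
      else (aliveRows n dead)[i-1]? := by
    intro i
    rw [← hins, List.getElem?_insertIdx]
    by_cases h1 : i < j
    · rw [if_pos h1, if_pos h1]
    · rw [if_neg h1, if_neg h1]
      by_cases h2 : i = j
      · rw [if_pos h2, if_pos h2, if_pos (by omega)]
      · rw [if_neg h2, if_neg h2]
  have hjF' : (aliveRows n dead.dropLast)[j]? = some jt := by
    rw [hF j, if_neg (by omega), if_pos rfl]
  have hnextJ : nextIn n dead.dropLast jt = (aliveRows n dead)[j]? := by
    rw [nextIn_eq hjF', hF (j+1), if_neg (by omega), if_neg (by omega)]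
    simp only [Nat.add_sub_cancel]
  have hprevJ : prevIn n dead.dropLast jt =
      if j = 0 then none else (aliveRows n dead)[j-1]? := by
    rw [prevIn_eq hjF']
    by_cases h0 : j = 0
    · rw [if_pos h0, if_pos h0]
    · rw [if_neg h0, if_neg h0, hF (j-1), if_pos (by omega)]
  -- the stored triple
  have hdel : a.delRow = dspec n [] dead.dropLast
      ++ [(prevIn n dead.dropLast jt, some jt, nextIn n dead.dropLast jt)] := by
    rw [inv.del_eq]
    conv_lhs => rw [← hdecomp]
    rw [dspec_append]
    rfl
  have hdellast : a.delRow.getLast? =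
      some (prevIn n dead.dropLast jt, some jt, nextIn n dead.dropLast jt) := by
    rw [hdel]; simp
  have hdeldrop : a.delRow.dropLast = dspec n [] dead.dropLast := by
    rw [hdel]; simp
  -- answer update
  have hjtoNat : jt.toNat < a.answer.length := by rw [inv.ans_len]; omega
  have hset : PySem.List.pySet? a.answer jt 'O' = some (a.answer.set jt.toNat 'O') := by
    have h1 : jt = ((jt.toNat : Nat) : Int) := by omega
    conv_lhs => rw [h1]
    rw [PySem.List.pySet?_natCast _ _ _ hjtoNat]
  -- shared new fields
  have hmem' : ∀ x ∈ dead.dropLast, 0 ≤ x ∧ x < n :=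
    fun x hx => inv.dead_mem x (List.mem_of_mem_dropLast hx)
  have hnodup' : dead.dropLast.Nodup := List.Nodup.sublist (List.dropLast_sublist dead) inv.nodup
  have hanslen' : (a.answer.set jt.toNat 'O').length = n.toNat := by simp [inv.ans_len]
  have hans' : ∀ i : Nat, i < n.toNat →
      (a.answer.set jt.toNat 'O')[i]? = some (if (i : Int) ∈ dead.dropLast then 'X' else 'O') := by
    intro i hi
    rw [List.getElem?_set]
    by_cases hic : jt.toNat = i
    · have hij : (i : Int) = jt := by omega
      rw [if_pos hic, if_pos (hic ▸ hjtoNat), if_neg (fun hmm => hjnot (hij ▸ hmm))]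
    · rw [if_neg hic, inv.ans_at i hi]
      have hiff : ((i : Int) ∈ dead) ↔ ((i : Int) ∈ dead.dropLast) := by
        conv_lhs => rw [← hdecomp]
        simp [List.mem_append]
        intro h; omega
      by_cases hm : (i : Int) ∈ dead
      · rw [if_pos hm, if_pos (hiff.mp hm)]
      · rw [if_neg hm, if_neg (fun hh => hm (hiff.mpr hh))]
  have hdeadne' : ∀ {i q : Nat} {v : Int},
      (aliveRows n dead)[q]? = some v → dead.dropLast[i]? = some v → False := by
    intro i q v hv hdv
    have h1 : v ∈ aliveRows n dead := List.mem_iff_getElem?.mpr ⟨q, hv⟩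
    have h2 : v ∈ dead := List.mem_of_mem_dropLast (List.mem_iff_getElem?.mpr ⟨i, hdv⟩)
    exact (mem_aliveRows.mp h1).2.2 h2
  have hjtlastidx : dead[dead.length - 1]? = some jt := by
    rw [← List.getLast?_eq_getElem?]
    exact hlast
  have htakelast : dead.take (dead.length - 1) = dead.dropLast := List.dropLast_eq_take.symm
  have htblJ : a.table.get? jt =
      some (prevIn n dead.dropLast jt, nextIn n dead.dropLast jt) := by
    have := inv.tbl_dead (dead.length - 1) jt hjtlastidx
    rw [htakelast] at this
    exact this
  -- B's step
  have hBeq : stepB b "Z" = some ⟨aliveRows n dead.dropLast,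
      if (j : Int) ≤ b.pos then b.pos + 1 else b.pos, dead.dropLast⟩ := by
    simp only [stepB]
    rw [if_neg (by decide : ¬("Z":String) = "C")]
    simp only [if_true]
    simp only [inv.stack_eq, hlast, inv.rows_eq]
    rw [← hjdef, PySem.List.insert_natCast _ _ _ hjle,
      ← insertIdx_eq_take_cons_drop _ _ _ hjle, hins]
  -- position invariant
  have hposinv : (∃ p' : Nat, (if (j : Int) ≤ b.pos then b.pos + 1 else b.pos) = (p' : Int) ∧
      (aliveRows n dead.dropLast)[p']? = some cur) ∨
      (¬ (0 ≤ cur ∧ cur < n) ∧ dead.dropLast = []) := by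
    refine Or.inl ?_
    by_cases hjp : (j : Int) ≤ b.pos
    · refine ⟨p + 1, by rw [if_pos hjp, hbp]; push_cast; ring, ?_⟩
      rw [hF (p+1), if_neg (by rw [hbp] at hjp; omega), if_neg (by rw [hbp] at hjp; omega)]
      simpa using hp
    · refine ⟨p, by rw [if_neg hjp, hbp], ?_⟩
      rw [hF p, if_pos (by rw [hbp] at hjp; omega)]
      exact hp
  -- case analysis on the stored neighbours
  rcases hPV : prevIn n dead.dropLast jt with _ | pv <;>
    rcases hNX : nextIn n dead.dropLast jt with _ | nx
  · -- both none: impossible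
    exfalso
    rw [hnextJ] at hNX
    rw [hprevJ] at hPV
    have hlen0 : (aliveRows n dead).length ≤ j := by
      have := List.getElem?_eq_none_iff.mp hNX; omega
    by_cases h0 : j = 0
    · have : p < (aliveRows n dead).length := (List.getElem?_eq_some_iff.mp hp).1
      omega
    · rw [if_neg h0] at hPV
      have := List.getElem?_eq_none_iff.mp hPV
      omega
  · -- prev none, next some nx: j = 0
    have hj00 : j = 0 := by
      by_contra h0
      rw [hprevJ, if_neg h0] at hPV
      rw [hnextJ] at hNX
      have h1 := List.getElem?_eq_none_iff.mp hPV
      have h2 := (List.getElem?_eq_some_iff.mp hNX).1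
      omega
    have hnxj : (aliveRows n dead)[j]? = some nx := by rw [← hnextJ, hNX]
    have henx := inv.tbl_alive j nx hnxj
    have hjtnx : jt ≠ nx := by
      intro h
      exact (mem_aliveRows.mp (List.mem_iff_getElem?.mpr ⟨j, hnxj⟩)).2.2 (h ▸ hjmem)
    have hAeq : stepA a "Z" = some ⟨a.answer.set jt.toNat 'O', dspec n [] dead.dropLast,
        a.table.insert nx (some jt, (aliveRows n dead)[j+1]?), a.k⟩ := by
      have henx' : a.table.get? nx =
          some ((if j = 0 then none else (aliveRows n dead)[j-1]?), (aliveRows n dead)[j+1]?) := henx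
      simp only [stepA]
      rw [if_neg (by decide : ¬("Z":String) = "C")]
      simp only [if_true]
      simp only [hdellast, hset, hdeldrop, hPV, hNX, henx']
    refine ⟨_, _, hAeq, hBeq, ?_⟩
    refine ⟨rfl, rfl, hmem', hnodup', inv.k_eq, hanslen', hans', rfl, ?_, ?_, hposinv⟩
    · -- tbl_alive wrt dead.dropLast
      intro q' m' hq'
      rw [hF q'] at hq'
      rw [PySem.Dict.get?_insert]
      by_cases hq'j : q' = j
      · -- m' = jt
        rw [if_neg (by omega : ¬ q' < j), if_pos hq'j] at hq'
        have hmjt : m' = jt := by injection hq'.symm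
        subst hmjt
        rw [if_neg hjtnx, htblJ]
        refine congrArg some ?_
        rw [Prod.mk.injEq]
        refine ⟨?_, ?_⟩
        · rw [hPV, hq'j, if_pos hj00]
        · rw [hNX, hF (q'+1), if_neg (by omega), if_neg (by omega)]
          rw [← hNX, hnextJ]
          congr 1
          omega
      · rw [if_neg (by omega), if_neg hq'j] at hq'
        have hq'0 : q' ≠ 0 := by omega
        by_cases hmnx : m' = nx
        · -- q' - 1 = j, i.e. q' = 1
          have : q' - 1 = j := getElem?_inj_sorted (sorted_aliveRows n dead) hq' (hmnx ▸ hnxj)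
          have hq'1 : q' = 1 := by omega
          rw [if_pos hmnx]
          refine congrArg some ?_
          rw [Prod.mk.injEq]
          refine ⟨?_, ?_⟩
          · rw [if_neg hq'0, hq'1, hF (1-1), if_neg (by omega), if_pos (by omega)]
          · rw [hq'1, hF (1+1), if_neg (by omega), if_neg (by omega), hj00]
        · rw [if_neg hmnx]
          have hne2 : q' - 1 ≠ j := by
            intro h; exact hmnx (by rw [h] at hq'; injection (hq'.symm.trans hnxj))
          have hold := inv.tbl_alive (q'-1) m' hq'
          rw [hold]
          refine congrArg some ?_
          rw [Prod.mk.injEq]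
          refine ⟨?_, ?_⟩
          · rw [if_neg hq'0]
            have hq'm1 : q' - 1 ≠ 0 := by omega
            rw [if_neg hq'm1, hF (q'-1), if_neg (by omega), if_neg (by omega)]
          · rw [hF (q'+1), if_neg (by omega), if_neg (by omega)]
            congr 1
            omega
    · -- tbl_dead wrt dead.dropLast
      intro i x hix
      have hixd : dead[i]? = some x := by
        conv_lhs => rw [← hdecomp]
        rw [List.getElem?_append, if_pos (by
          have := (List.getElem?_eq_some_iff.mp hix).1
          simpa using this)]
        exact hix
      have hiL : i < dead.dropLast.length := (List.getElem?_eq_some_iff.mp hix).1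
      have htakei : dead.take i = dead.dropLast.take i := by
        conv_lhs => rw [← hdecomp]
        rw [List.take_append_of_le_length (by omega)]
      rw [PySem.Dict.get?_insert, if_neg (fun h => hdeadne' hnxj (h ▸ hix)),
        inv.tbl_dead i x hixd, htakei]
  · -- prev some pv, next none: j = rows.length
    have hjlen : j = (aliveRows n dead).length := by
      rw [hnextJ] at hNX
      have := List.getElem?_eq_none_iff.mp hNX
      omega
    have hj0' : j ≠ 0 := by
      intro h0
      rw [hprevJ, if_pos h0] at hPV
      simp at hPV
    have hpvj : (aliveRows n dead)[j-1]? = some pv := by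
      rw [hprevJ, if_neg hj0'] at hPV
      exact hPV
    have hepv := inv.tbl_alive (j-1) pv hpvj
    have hjtpv : jt ≠ pv := by
      intro h
      exact (mem_aliveRows.mp (List.mem_iff_getElem?.mpr ⟨j-1, hpvj⟩)).2.2 (h ▸ hjmem)
    have hAeq : stepA a "Z" = some ⟨a.answer.set jt.toNat 'O', dspec n [] dead.dropLast,
        a.table.insert pv ((if j - 1 = 0 then none else (aliveRows n dead)[j-1-1]?), some jt),
        a.k⟩ := by
      have hepv' : a.table.get? pv =
          some ((if j - 1 = 0 then none else (aliveRows n dead)[j-1-1]?),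
            (aliveRows n dead)[j-1+1]?) := hepv
      simp only [stepA]
      rw [if_neg (by decide : ¬("Z":String) = "C")]
      simp only [if_true]
      simp only [hdellast, hset, hdeldrop, hPV, hNX, hepv']
    refine ⟨_, _, hAeq, hBeq, ?_⟩
    refine ⟨rfl, rfl, hmem', hnodup', inv.k_eq, hanslen', hans', rfl, ?_, ?_, hposinv⟩
    · intro q' m' hq'
      rw [hF q'] at hq'
      rw [PySem.Dict.get?_insert]
      by_cases hq'j : q' = j
      · rw [if_neg (by omega : ¬ q' < j), if_pos hq'j] at hq'
        have hmjt : m' = jt := by injection hq'.symm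
        subst hmjt
        rw [if_neg hjtpv, htblJ]
        refine congrArg some ?_
        rw [Prod.mk.injEq]
        refine ⟨?_, ?_⟩
        · rw [hPV, hq'j, if_neg hj0', hF (j-1), if_pos (by omega), hpvj]
        · rw [hNX, hq'j, hF (j+1), if_neg (by omega), if_neg (by omega)]
          simp only [Nat.add_sub_cancel]
          rw [List.getElem?_eq_none_iff.mpr (by omega)]
      · by_cases hq'lt : q' < j
        · rw [if_pos hq'lt] at hq'
          by_cases hmpv : m' = pv
          · have hq'e : q' = j - 1 := getElem?_inj_sorted (sorted_aliveRows n dead) hq' (hmpv ▸ hpvj)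
            rw [if_pos hmpv]
            refine congrArg some ?_
            rw [Prod.mk.injEq]
            refine ⟨?_, ?_⟩
            · subst hq'e
              by_cases h0 : j - 1 = 0
              · rw [if_pos h0, if_pos h0]
              · rw [if_neg h0, if_neg h0, hF (j-1-1), if_pos (by omega)]
            · subst hq'e
              rw [hF (j-1+1)]
              have h1 : j - 1 + 1 = j := by omega
              rw [h1, if_neg (by omega), if_pos rfl]
          · rw [if_neg hmpv]
            have hq'ne : q' ≠ j - 1 := by
              intro h; exact hmpv (by rw [h] at hq'; injection (hq'.symm.trans hpvj))
            have hold := inv.tbl_alive q' m' hq'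
            rw [hold]
            refine congrArg some ?_
            rw [Prod.mk.injEq]
            refine ⟨?_, ?_⟩
            · by_cases h0 : q' = 0
              · rw [if_pos h0, if_pos h0]
              · rw [if_neg h0, if_neg h0, hF (q'-1), if_pos (by omega)]
            · rw [hF (q'+1), if_pos (by omega)]
        · -- q' > j: impossible since rowsF length = j + 1
          exfalso
          rw [if_neg hq'lt, if_neg hq'j] at hq'
          have := (List.getElem?_eq_some_iff.mp hq').1
          omega
    · intro i x hix
      have hixd : dead[i]? = some x := by
        conv_lhs => rw [← hdecomp]
        rw [List.getElem?_append, if_pos (by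
          have := (List.getElem?_eq_some_iff.mp hix).1
          simpa using this)]
        exact hix
      have htakei : dead.take i = dead.dropLast.take i := by
        conv_lhs => rw [← hdecomp]
        rw [List.take_append_of_le_length (by
          have := (List.getElem?_eq_some_iff.mp hix).1
          omega)]
      rw [PySem.Dict.get?_insert, if_neg (fun h => hdeadne' hpvj (h ▸ hix)),
        inv.tbl_dead i x hixd, htakei]
  · -- both some: 0 < j < rows.length
    have hnxj : (aliveRows n dead)[j]? = some nx := by rw [← hnextJ, hNX]
    have hj0' : j ≠ 0 := by
      intro h0
      rw [hprevJ, if_pos h0] at hPV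
      simp at hPV
    have hpvj : (aliveRows n dead)[j-1]? = some pv := by
      rw [hprevJ, if_neg hj0'] at hPV
      exact hPV
    have henx := inv.tbl_alive j nx hnxj
    have hepv := inv.tbl_alive (j-1) pv hpvj
    have hjtnx : jt ≠ nx := by
      intro h
      exact (mem_aliveRows.mp (List.mem_iff_getElem?.mpr ⟨j, hnxj⟩)).2.2 (h ▸ hjmem)
    have hjtpv : jt ≠ pv := by
      intro h
      exact (mem_aliveRows.mp (List.mem_iff_getElem?.mpr ⟨j-1, hpvj⟩)).2.2 (h ▸ hjmem)
    have hpvnx : pv ≠ nx := getElem?_ne_of_ne (sorted_aliveRows n dead) hpvj hnxj (by omega)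
    have hAeq : stepA a "Z" = some ⟨a.answer.set jt.toNat 'O', dspec n [] dead.dropLast,
        (a.table.insert nx (some jt, (aliveRows n dead)[j+1]?)).insert pv
          ((if j - 1 = 0 then none else (aliveRows n dead)[j-1-1]?), some jt),
        a.k⟩ := by
      have henx' : a.table.get? nx =
          some ((if j = 0 then none else (aliveRows n dead)[j-1]?), (aliveRows n dead)[j+1]?) := henx
      have hepv' : a.table.get? pv =
          some ((if j - 1 = 0 then none else (aliveRows n dead)[j-1-1]?),
            (aliveRows n dead)[j-1+1]?) := hepv
      simp only [stepA]
      rw [if_neg (by decide : ¬("Z":String) = "C")]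
      simp only [if_true]
      simp only [hdellast, hset, hdeldrop, hPV, hNX, henx']
      rw [PySem.Dict.get?_insert, if_neg hpvnx, hepv']
    refine ⟨_, _, hAeq, hBeq, ?_⟩
    refine ⟨rfl, rfl, hmem', hnodup', inv.k_eq, hanslen', hans', rfl, ?_, ?_, hposinv⟩
    · intro q' m' hq'
      rw [hF q'] at hq'
      rw [PySem.Dict.get?_insert, PySem.Dict.get?_insert]
      by_cases hq'j : q' = j
      · rw [if_neg (by omega : ¬ q' < j), if_pos hq'j] at hq'
        have hmjt : m' = jt := by injection hq'.symm
        subst hmjt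
        rw [if_neg hjtpv, if_neg hjtnx, htblJ]
        refine congrArg some ?_
        rw [Prod.mk.injEq]
        refine ⟨?_, ?_⟩
        · rw [hPV, hq'j, if_neg hj0', hF (j-1), if_pos (by omega), hpvj]
        · rw [hNX, hq'j, hF (j+1), if_neg (by omega), if_neg (by omega)]
          simp only [Nat.add_sub_cancel]
          rw [hnxj]
      · by_cases hq'lt : q' < j
        · rw [if_pos hq'lt] at hq'
          by_cases hmpv : m' = pv
          · have hq'e : q' = j - 1 := getElem?_inj_sorted (sorted_aliveRows n dead) hq' (hmpv ▸ hpvj)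
            rw [if_pos hmpv]
            refine congrArg some ?_
            rw [Prod.mk.injEq]
            refine ⟨?_, ?_⟩
            · subst hq'e
              by_cases h0 : j - 1 = 0
              · rw [if_pos h0, if_pos h0]
              · rw [if_neg h0, if_neg h0, hF (j-1-1), if_pos (by omega)]
            · subst hq'e
              rw [hF (j-1+1)]
              have h1 : j - 1 + 1 = j := by omega
              rw [h1, if_neg (by omega), if_pos rfl]
          · have hmnx : m' ≠ nx :=
              getElem?_ne_of_ne (sorted_aliveRows n dead) hq' hnxj (by omega)
            rw [if_neg hmpv, if_neg hmnx]
            have hq'ne : q' ≠ j - 1 := by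
              intro h; exact hmpv (by rw [h] at hq'; injection (hq'.symm.trans hpvj))
            have hold := inv.tbl_alive q' m' hq'
            rw [hold]
            refine congrArg some ?_
            rw [Prod.mk.injEq]
            refine ⟨?_, ?_⟩
            · by_cases h0 : q' = 0
              · rw [if_pos h0, if_pos h0]
              · rw [if_neg h0, if_neg h0, hF (q'-1), if_pos (by omega)]
            · rw [hF (q'+1), if_pos (by omega)]
        · -- q' > j
          rw [if_neg hq'lt, if_neg hq'j] at hq'
          by_cases hmnx : m' = nx
          · have hq'e : q' - 1 = j := getElem?_inj_sorted (sorted_aliveRows n dead) hq' (hmnx ▸ hnxj)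
            have hmpv : m' ≠ pv := by
              subst hmnx
              exact fun h => hpvnx h.symm
            rw [if_neg hmpv, if_pos hmnx]
            refine congrArg some ?_
            rw [Prod.mk.injEq]
            refine ⟨?_, ?_⟩
            · rw [if_neg (by omega : ¬ q' = 0), hF (q'-1), if_neg (by omega), if_pos hq'e]
            · rw [hF (q'+1), if_neg (by omega), if_neg (by omega)]
              congr 1
              omega
          · have hmpv : m' ≠ pv := by
              intro h
              have := getElem?_inj_sorted (sorted_aliveRows n dead) hq' (h ▸ hpvj)
              omega
            rw [if_neg hmpv, if_neg hmnx]
            have hq'ne : q' - 1 ≠ j := by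
              intro h; exact hmnx (by rw [h] at hq'; injection (hq'.symm.trans hnxj))
            have hold := inv.tbl_alive (q'-1) m' hq'
            rw [hold]
            refine congrArg some ?_
            rw [Prod.mk.injEq]
            refine ⟨?_, ?_⟩
            · rw [if_neg (by omega : ¬ q' = 0), if_neg (by omega : ¬ q' - 1 = 0),
                hF (q'-1), if_neg (by omega), if_neg (by omega)]
            · rw [hF (q'+1), if_neg (by omega), if_neg (by omega)]
              congr 1
              omega
    · intro i x hix
      have hixd : dead[i]? = some x := by
        conv_lhs => rw [← hdecomp]
        rw [List.getElem?_append, if_pos (by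
          have := (List.getElem?_eq_some_iff.mp hix).1
          simpa using this)]
        exact hix
      have htakei : dead.take i = dead.dropLast.take i := by
        conv_lhs => rw [← hdecomp]
        rw [List.take_append_of_le_length (by
          have := (List.getElem?_eq_some_iff.mp hix).1
          omega)]
      rw [PySem.Dict.get?_insert, if_neg (fun h => hdeadne' hpvj (h ▸ hix)),
        PySem.Dict.get?_insert, if_neg (fun h => hdeadne' hnxj (h ▸ hix)),
        inv.tbl_dead i x hixd, htakei]

lemma stepMv_sim {n : Int} {dead : List Int} {cur : Int} {a : AState} {b : BState}
    (inv : SimInv n dead cur a b) {c : String} (hc1 : c ≠ "C") (hc2 : c ≠ "Z")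
    {d ms : String} {m : Int} (hsplit : PySem.Str.split? c " " = some [d, ms])
    (hms : PySem.Int.ofStr? ms = some m) (hm0 : 0 ≤ m) {cur' : Int}
    (hiter : iterMove n dead (d = "D") m.toNat cur = some cur') :
    ∃ a' b', stepA a c = some a' ∧ stepB b c = some b' ∧ SimInv n dead cur' a' b' := by
  have key : ∀ (t : Nat) (c0 : Int) (p : Nat),
      (aliveRows n dead)[p]? = some c0 → ∀ {c1 : Int},
      iterMove n dead (d = "D") t c0 = some c1 →
      ∃ p' : Nat, (aliveRows n dead)[p']? = some c1 ∧
        (if d = "D" then (p' : Int) = p + t else (p' : Int) = (p : Int) - t ∧ t ≤ p) ∧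
        (fun acc => match acc with
          | none => none
          | some none => none
          | some (some kv) =>
            match a.table.get? kv with
            | none => none
            | some e => some (if d = "D" then e.2 else e.1))^[t] (some (some c0)) = some (some c1) := by
    intro t
    induction t with
    | zero =>
      intro c0 p hp c1 hit
      have : c1 = c0 := by simpa [iterMove] using hit.symm
      subst this
      exact ⟨p, hp, by split <;> simp, by simp⟩
    | succ t ih =>
      intro c0 p hp c1 hit
      rw [iterMove] at hit
      have hok : aliveOk n dead c0 = true :=
        aliveOk_iff.mpr (List.mem_iff_getElem?.mpr ⟨p, hp⟩)
      rw [stepMove, if_pos hok] at hit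
      have htbl := inv.tbl_alive p c0 hp
      by_cases hd : d = "D"
      · rw [if_pos (by simp [hd])] at hit
        rcases hnx : nextIn n dead c0 with _ | c2
        · rw [hnx] at hit; simp at hit
        · rw [hnx] at hit
          have h2 : (aliveRows n dead)[p+1]? = some c2 := by rw [← nextIn_eq hp, hnx]
          obtain ⟨p', hp', harith, hfold⟩ := ih c2 (p+1) h2 hit
          refine ⟨p', hp', ?_, ?_⟩
          · rw [if_pos hd] at harith ⊢; push_cast at harith ⊢; omega
          · rw [Function.iterate_succ_apply]
            have hstep : (match a.table.get? c0 with
                | none => none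
                | some e => some (if d = "D" then e.2 else e.1)) = some (some c2) := by
              rw [htbl]
              simp only [if_pos hd]
              rw [← nextIn_eq hp, hnx]
            simpa [hstep] using hfold
      · rw [if_neg (by simp [hd])] at hit
        rcases hpv : prevIn n dead c0 with _ | c2
        · rw [hpv] at hit; simp at hit
        · rw [hpv] at hit
          have hprev := prevIn_eq hp
          by_cases hp0 : p = 0
          · rw [hp0] at hprev; rw [hprev] at hpv; simp at hpv
          · rw [if_neg hp0] at hprev
            have h2 : (aliveRows n dead)[p-1]? = some c2 := by rw [← hprev, hpv]
            obtain ⟨p', hp', harith, hfold⟩ := ih c2 (p-1) h2 hit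
            refine ⟨p', hp', ?_, ?_⟩
            · rw [if_neg hd] at harith ⊢
              obtain ⟨ha1, ha2⟩ := harith
              refine ⟨by push_cast at ha1 ⊢; omega, by omega⟩
            · rw [Function.iterate_succ_apply]
              have hstep : (match a.table.get? c0 with
                  | none => none
                  | some e => some (if d = "D" then e.2 else e.1)) = some (some c2) := by
                rw [htbl]
                simp only [if_neg hd]
                rw [if_neg hp0, h2]
              simpa [hstep] using hfold
  -- compute stepA a c down to the loop
  have hAeq : stepA a c =
      (match (List.range m.toNat).foldl
          (fun (acc : Option (Option Int)) _ =>
            match acc with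
            | none => none
            | some none => none
            | some (some kv) =>
              match a.table.get? kv with
              | none => none
              | some e => some (if d = "D" then e.2 else e.1)) (some a.k) with
        | none => none
        | some k' => some ⟨a.answer, a.delRow, a.table, k'⟩) := by
    rw [stepA, if_neg hc1, if_neg hc2, hsplit]
    simp only [hms]
  have hBeq : stepB b c = some ⟨b.rows, if d = "D" then b.pos + m else b.pos - m, b.stack⟩ := by
    rw [stepB, if_neg hc1, if_neg hc2, hsplit]
    simp only [hms]
  rw [foldl_range_iterate] at hAeq
  rcases inv.pos_inv with ⟨p, hbp, hp⟩ | ⟨hcur, hdead⟩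
  · obtain ⟨p', hp', harith, hfold⟩ := key m.toNat cur p hp hiter
    rw [inv.k_eq, hfold] at hAeq
    refine ⟨⟨a.answer, a.delRow, a.table, some cur'⟩,
      ⟨b.rows, if d = "D" then b.pos + m else b.pos - m, b.stack⟩, hAeq, hBeq, ?_⟩
    refine ⟨inv.rows_eq, inv.stack_eq, inv.dead_mem, inv.nodup, rfl, inv.ans_len, inv.ans_at,
      inv.del_eq, inv.tbl_alive, inv.tbl_dead, Or.inl ⟨p', ?_, hp'⟩⟩
    by_cases hd : d = "D"
    · rw [if_pos hd] at harith
      show (if d = "D" then b.pos + m else b.pos - m) = (p' : Int)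
      rw [if_pos hd, hbp]
      omega
    · rw [if_neg hd] at harith
      obtain ⟨ha1, ha2⟩ := harith
      show (if d = "D" then b.pos + m else b.pos - m) = (p' : Int)
      rw [if_neg hd, hbp]
      omega
  · have ht0 : m.toNat = 0 := by
      by_contra h0
      rcases Nat.exists_eq_succ_of_ne_zero h0 with ⟨t, ht⟩
      rw [ht, iterMove, stepMove, if_neg (by simp [aliveOk]; intro h1 h2; omega)] at hiter
      simp at hiter
    rw [ht0] at hiter
    have hcc : cur' = cur := by simpa [iterMove] using hiter.symm
    subst hcc
    have hm00 : m = 0 := by omega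
    rw [inv.k_eq, ht0] at hAeq
    simp only [Function.iterate_zero, id] at hAeq
    refine ⟨⟨a.answer, a.delRow, a.table, some cur'⟩,
      ⟨b.rows, if d = "D" then b.pos + m else b.pos - m, b.stack⟩, hAeq, hBeq, ?_⟩
    refine ⟨inv.rows_eq, inv.stack_eq, inv.dead_mem, inv.nodup, rfl, inv.ans_len, inv.ans_at,
      inv.del_eq, inv.tbl_alive, inv.tbl_dead, Or.inr ⟨hcur, hdead⟩⟩

-- ---- main induction ----

lemma sim_main {n : Int} (cmds : List String) : ∀ (dead : List Int) (cur : Int) (a : AState) (b : BState),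
    SimInv n dead cur a b → validSim n cmds dead cur = true →
    ∃ dead' cur' a' b',
      cmds.foldl (fun acc c => acc.bind (fun st => stepA st c)) (some a) = some a' ∧
      cmds.foldl (fun acc c => acc.bind (fun st => stepB st c)) (some b) = some b' ∧
      SimInv n dead' cur' a' b' := by
  induction cmds with
  | nil =>
    intro dead cur a b inv _
    exact ⟨dead, cur, a, b, rfl, rfl, inv⟩
  | cons c rest ih =>
    intro dead cur a b inv hv
    rw [validSim] at hv
    by_cases hc : c = "C"
    · subst hc
      rw [if_pos rfl] at hv
      by_cases hok : aliveOk n dead cur = true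
      · rw [if_pos hok] at hv
        have hstep : ∃ cur', (match nextIn n dead cur with
            | some nx => some nx | none => prevIn n dead cur) = some cur' ∧
            validSim n rest (dead ++ [cur]) cur' = true := by
          rcases hnx : nextIn n dead cur with _ | nx
          · rw [hnx] at hv
            rcases hpv : prevIn n dead cur with _ | pv
            · rw [hpv] at hv; simp at hv
            · rw [hpv] at hv; exact ⟨pv, rfl, hv⟩
          · rw [hnx] at hv; exact ⟨nx, rfl, hv⟩
        obtain ⟨cur', hcur', hv'⟩ := hstep
        obtain ⟨a', b', ha', hb', inv'⟩ := stepC_sim inv hok hcur'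
        obtain ⟨dead'', cur'', a'', b'', hA, hB, inv''⟩ := ih _ _ _ _ inv' hv'
        refine ⟨dead'', cur'', a'', b'', ?_, ?_, inv''⟩
        · simpa [ha'] using hA
        · simpa [hb'] using hB
      · rw [if_neg hok] at hv; simp at hv
    · by_cases hz : c = "Z"
      · subst hz
        rw [if_neg hc, if_pos rfl] at hv
        rcases hlast : dead.getLast? with _ | r
        · rw [hlast] at hv; simp at hv
        · rw [hlast] at hv
          have hne : dead ≠ [] := by intro h; rw [h] at hlast; simp at hlast
          obtain ⟨a', b', ha', hb', inv'⟩ := stepZ_sim inv hne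
          obtain ⟨dead'', cur'', a'', b'', hA, hB, inv''⟩ := ih _ _ _ _ inv' hv
          refine ⟨dead'', cur'', a'', b'', ?_, ?_, inv''⟩
          · simpa [ha'] using hA
          · simpa [hb'] using hB
      · rw [if_neg hc, if_neg hz] at hv
        rcases hsplit : PySem.Str.split? c " " with _ | parts
        · rw [hsplit] at hv; simp at hv
        · rw [hsplit] at hv
          match parts with
          | [] => simp at hv
          | [_] => simp at hv
          | (_ :: _ :: _ :: _) => simp at hv
          | [d, ms] =>
            have hv' : (match PySem.Int.ofStr? ms with
                | some m =>
                  if 0 ≤ m then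
                    match iterMove n dead (decide (d = "D")) m.toNat cur with
                    | some cur' => validSim n rest dead cur'
                    | none => false
                  else false
                | none => false) = true := hv
            clear hv
            rcases hms : PySem.Int.ofStr? ms with _ | m
            · rw [hms] at hv'; simp at hv'
            · rw [hms] at hv'
              have hv2 : (if 0 ≤ m then
                    match iterMove n dead (decide (d = "D")) m.toNat cur with
                    | some cur' => validSim n rest dead cur'
                    | none => false
                  else false) = true := hv'
              clear hv'
              by_cases hm0 : (0:Int) ≤ m
              · rw [if_pos hm0] at hv2
                rcases hiter : iterMove n dead (decide (d = "D")) m.toNat cur with _ | cur'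
                · rw [hiter] at hv2; simp at hv2
                · rw [hiter] at hv2
                  obtain ⟨a', b', ha', hb', inv'⟩ := stepMv_sim inv hc hz hsplit hms hm0 hiter
                  obtain ⟨dead'', cur'', a'', b'', hA, hB, inv''⟩ := ih _ _ _ _ inv' hv2
                  refine ⟨dead'', cur'', a'', b'', ?_, ?_, inv''⟩
                  · simpa [ha'] using hA
                  · simpa [hb'] using hB
              · rw [if_neg hm0] at hv2; simp at hv2

-- ---- final output ----

lemma marks_fold {stack : List Int} : ∀ (l : List Char),
    (∀ r ∈ stack, 0 ≤ r ∧ r < (l.length : Int)) →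
    ∃ l', stack.foldl (fun (acc : Option (List Char)) r =>
        acc.bind (fun l => PySem.List.pySet? l r 'X')) (some l) = some l' ∧
      l'.length = l.length ∧
      ∀ i : Nat, l'[i]? = if (i : Int) ∈ stack then some 'X' else l[i]? := by
  induction stack with
  | nil => intro l _; exact ⟨l, rfl, rfl, by intro i; simp⟩
  | cons r rest ih =>
    intro l h
    have hr := h r (by simp)
    have hlt : r.toNat < l.length := by omega
    have hset : PySem.List.pySet? l r 'X' = some (l.set r.toNat 'X') := by
      have h1 : r = ((r.toNat : Nat) : Int) := by omega
      conv_lhs => rw [h1]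
      rw [PySem.List.pySet?_natCast _ _ _ hlt]
    obtain ⟨l', h1, h2, h3⟩ := ih (l.set r.toNat 'X')
      (by intro x hx; have := h x (by simp [hx]); simpa using this)
    refine ⟨l', by simpa [hset] using h1, by simpa using h2, fun i => ?_⟩
    rw [h3 i]
    by_cases hm : (i : Int) ∈ rest
    · simp [hm]
    · rw [if_neg hm]
      rw [List.getElem?_set]
      by_cases hir : (i : Int) = r
      · have hti : r.toNat = i := by omega
        have hil : i < l.length := hti ▸ hlt
        rw [if_pos (by simp [hir] : ((i:Int)) ∈ r :: rest)]
        rw [if_pos hti, if_pos hlt]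
      · have : r.toNat ≠ i := by omega
        simp [this, hir, hm]

lemma out_eq {n : Int} {dead : List Int} {cur : Int} {a : AState} {b : BState}
    (inv : SimInv n dead cur a b) :
    (match b.stack.foldl (fun (acc : Option (List Char)) r =>
        acc.bind (fun l => PySem.List.pySet? l r 'X')) (some (List.replicate n.toNat 'O')) with
      | some l => String.ofList l
      | none => "") = String.ofList a.answer := by
  obtain ⟨l', h1, h2, h3⟩ := marks_fold (stack := b.stack) (List.replicate n.toNat 'O')
    (by
      intro r hr
      rw [inv.stack_eq] at hr
      have := inv.dead_mem r hr
      simp; omega)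
  rw [h1]
  show String.ofList l' = String.ofList a.answer
  congr 1
  apply List.ext_getElem?
  intro i
  rw [h3 i, inv.stack_eq]
  by_cases hi : i < n.toNat
  · rw [inv.ans_at i hi]
    by_cases hm : (i : Int) ∈ dead <;> simp [hm, hi]
  · rw [if_neg (by intro hm; have := inv.dead_mem _ hm; omega)]
    rw [List.getElem?_eq_none (by simp; omega),
      (List.getElem?_eq_none (by rw [inv.ans_len]; omega) : a.answer[i]? = none)]

-- ===== VERDICT (by name: the statement is the Claim_ definition above) =====
theorem solution_spec : Claim_equal_solution := by
  intro n k cmd _ hpre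
  unfold Spec_solution solution solution_alt runA runB
  obtain ⟨dead', cur', a', b', hA, hB, inv'⟩ := sim_main cmd [] k _ _ (SimInv.init n k) hpre
  rw [hA, hB]
  exact (out_eq inv').symm
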